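-- pv_equiv track=rewrite | github.com/Tomoya0302/pddl-generalized-allocator | src/planning/constraint_aware_merge.py | _merge_role_signatures_constraint_aware
-- ===== SOURCE A (Python) =====
-- from typing import List, Dict, Set, Tuple, Optional
--
-- def _merge_role_signatures_constraint_aware(signature1: Dict[str, str], signature2: Dict[str, str]) -> Dict[str, str]:
--     """2つのrole_signatureを統合（制約考慮版）"""
--     merged_signature = signature1.copy()
--
--     for key, value in signature2.items():
--         if key in merged_signature:
--             if merged_signature[key] != value:
--                 # 異なる値の場合は統合（|で区切って結合）
--                 existing_values = set(merged_signature[key].split("|"))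
--                 new_values = set(value.split("|"))
--                 all_values = existing_values.union(new_values)
--                 merged_signature[key] = "|".join(sorted(all_values))
--         else:
--             merged_signature[key] = value
--
--     return merged_signature
-- ===== SOURCE B (Python) =====
-- def _merge_role_signatures_constraint_aware(signature1, signature2):
--     """Staged group-by: collect each key's values from both dicts, then reduce each group."""
--     groups = {}
--     for sig in (signature1, signature2):
--         for key, value in sig.items():
--             groups.setdefault(key, []).append(value)
--
--     merged = {}
--     for key, values in groups.items():
--         if len(values) == 2 and values[0] != values[1]:
--             merged[key] = "|".join(sorted(set(values[0].split("|")) | set(values[1].split("|"))))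
--         else:
--             merged[key] = values[0]
--     return merged
-- ===== Notes on version B (the rewrite author's own statement) =====
-- stated objective: alternative
-- what changed: A merges in one pass (copy signature1, then per key of signature2 test membership and conditionally union); B is a staged group-by: a first pass appends every value of both dicts to a per-key list with setdefault and a second pass reduces each group (two differing values -> sorted '|' token union, otherwise the first value), with no membership tests or conditional merging during the collection pass.
import Mathlib
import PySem

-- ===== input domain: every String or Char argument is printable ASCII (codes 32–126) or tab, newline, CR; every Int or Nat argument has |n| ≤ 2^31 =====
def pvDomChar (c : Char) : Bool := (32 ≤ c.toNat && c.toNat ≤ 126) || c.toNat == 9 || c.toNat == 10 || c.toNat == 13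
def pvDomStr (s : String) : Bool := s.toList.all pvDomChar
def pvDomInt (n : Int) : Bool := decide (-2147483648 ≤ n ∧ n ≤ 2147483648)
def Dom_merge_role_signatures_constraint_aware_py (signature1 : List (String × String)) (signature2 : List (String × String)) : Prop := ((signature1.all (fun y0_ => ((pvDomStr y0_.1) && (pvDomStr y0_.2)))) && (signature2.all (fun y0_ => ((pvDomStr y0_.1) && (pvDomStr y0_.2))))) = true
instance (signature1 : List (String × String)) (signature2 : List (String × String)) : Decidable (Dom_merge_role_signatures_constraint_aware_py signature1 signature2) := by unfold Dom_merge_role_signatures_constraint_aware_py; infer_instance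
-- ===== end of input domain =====

-- B replaces A's copy-then-conditionally-update merge by a staged group-by (collect each key's
-- value list from both dicts, then reduce each group); same result, different decomposition
-- (objective: alternative, not faster).

-- ===== PORT A =====
-- "|".join(sorted(set(a.split("|")) | set(b.split("|")))) — the identical expression occurs in both Pythons
def pvUnionJoin (a : String) (b : String) : String :=
  let existing_values := PySem.Set.ofList ((PySem.Str.split? a "|").getD [])   -- split? is some: sep "|" ≠ ""
  let new_values := PySem.Set.ofList ((PySem.Str.split? b "|").getD [])
  let all_values := PySem.Set.union existing_values new_values
  PySem.Str.join "|" (PySem.List.sorted all_values (fun x => x) false)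

-- dict parameters arrive as insertion-ordered association lists; PySem.Dict.ofList rebuilds the dict
def merge_role_signatures_constraint_aware_py (signature1 : List (String × String)) (signature2 : List (String × String)) : List (String × String) :=
  let merged_signature := PySem.Dict.ofList signature1
  let final := (PySem.Dict.ofList signature2).items.foldl
    (fun merged kv =>
      match merged.get? kv.1 with
      | some cur => if cur ≠ kv.2 then merged.insert kv.1 (pvUnionJoin cur kv.2) else merged
      | none => merged.insert kv.1 kv.2)
    merged_signature
  final.items

-- ===== PORT B =====
-- second stage: reduce one group of collected values (len == 2 and differing → union-join, else first)
def pvReduce (vals : List String) : String :=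
  if vals.length = 2 ∧ vals.getD 0 "" ≠ vals.getD 1 "" then
    pvUnionJoin (vals.getD 0 "") (vals.getD 1 "")
  else vals.getD 0 ""

def merge_role_signatures_constraint_aware_py_alt (signature1 : List (String × String)) (signature2 : List (String × String)) : List (String × String) :=
  -- stage 1: groups.setdefault(key, []).append(value) over both dicts in order
  let groups := ((PySem.Dict.ofList signature1).items ++ (PySem.Dict.ofList signature2).items).foldl
      (fun g p => g.modify p.1 [] (fun vs => vs ++ [p.2])) PySem.Dict.empty
  -- stage 2: merged[key] = reduce(values) for each group, in group order
  let merged := groups.items.foldl (fun m p => m.insert p.1 (pvReduce p.2)) PySem.Dict.empty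
  merged.items

-- ===== PRECONDITION & SPEC =====
def Spec_merge_role_signatures_constraint_aware_py (signature1 : List (String × String)) (signature2 : List (String × String)) (out : List (String × String)) : Prop := out = merge_role_signatures_constraint_aware_py_alt signature1 signature2
instance (signature1 : List (String × String)) (signature2 : List (String × String)) (out : List (String × String)) : Decidable (Spec_merge_role_signatures_constraint_aware_py signature1 signature2 out) := by unfold Spec_merge_role_signatures_constraint_aware_py; infer_instance

-- ===== CLAIM (what is proved, stated in full; the proofs are below) =====
def Claim_equal_merge_role_signatures_constraint_aware_py : Prop := ∀ (signature1 : List (String × String)) (signature2 : List (String × String)), Dom_merge_role_signatures_constraint_aware_py signature1 signature2 → Spec_merge_role_signatures_constraint_aware_py signature1 signature2 (merge_role_signatures_constraint_aware_py signature1 signature2)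

-- ===== LEMMAS AND PROOFS =====

-- the merged value an entry (k, v) of the start dict ends up with after folding A's update loop over l
def pvMergedVal (l : List (String × String)) (kv : String × String) : String × String :=
  match (PySem.Dict.mk l).get? kv.1 with
  | some w => (kv.1, if kv.2 ≠ w then pvUnionJoin kv.2 w else kv.2)
  | none => kv

-- characterisation of A's update loop: modified original entries, then the fresh entries of l in order
lemma pv_fold_items (l : List (String × String)) (d : PySem.Dict String String)
    (hl : (l.map Prod.fst).Nodup) (hd : d.keys.Nodup) :
    (l.foldl
      (fun merged kv =>
        match merged.get? kv.1 with
        | some cur => if cur ≠ kv.2 then merged.insert kv.1 (pvUnionJoin cur kv.2) else merged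
        | none => merged.insert kv.1 kv.2) d).items
      = d.items.map (pvMergedVal l) ++ l.filter (fun kv => !(d.contains kv.1)) := by
  induction l generalizing d with
  | nil =>
    have hid : ∀ kv : String × String, pvMergedVal [] kv = kv := fun kv => rfl
    simp only [List.foldl_nil, List.filter_nil, List.append_nil]
    symm
    refine (List.map_congr_left fun kv _ => hid kv).trans ?_
    simp
  | cons p t ih =>
    obtain ⟨k, w⟩ := p
    simp only [List.map_cons, List.nodup_cons] at hl
    obtain ⟨hk, ht⟩ := hl
    have hknt : ({ items := t } : PySem.Dict String String).get? k = none := by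
      rw [PySem.Dict.get?_eq_none_iff_not_mem_keys, PySem.Dict.keys_mk]; exact hk
    simp only [List.foldl_cons]
    cases hget : d.get? k with
    | some v =>
      have hcont : d.contains k = true := by
        rw [PySem.Dict.contains_eq_isSome_get?, hget]; rfl
      have hfilter : ((k, w) :: t).filter (fun kv => !(d.contains kv.1)) =
          t.filter (fun kv => !(d.contains kv.1)) := by
        simp [hcont]
      by_cases hvw : v = w
      · -- equal values: the dict is left unchanged
        simp only [hvw, ne_eq, not_true_eq_false, if_false]
        rw [ih d ht hd, hfilter]
        congr 1
        refine List.map_congr_left ?_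
        rintro ⟨a, b⟩ hkv
        by_cases hkk : a = k
        · have hab : d.get? a = some b := PySem.Dict.get?_of_mem_items d hkv hd
          rw [hkk, hget] at hab
          have hv2 : b = v := (Option.some.inj hab).symm
          simp [pvMergedVal, PySem.Dict.get?_mk_cons, hkk, hknt, hv2, hvw]
        · simp [pvMergedVal, PySem.Dict.get?_mk_cons, (by simpa using Ne.symm hkk : (k == a) = false)]
      · -- different values: overwrite in place with the merged string
        simp only [ne_eq, hvw, not_false_eq_true, if_true]
        have hkeys : (d.insert k (pvUnionJoin v w)).keys = d.keys :=
          PySem.Dict.keys_insert_of_contains d _ hcont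
        rw [ih _ ht (by rw [hkeys]; exact hd)]
        rw [PySem.Dict.items_insert_of_contains d _ hcont, hfilter]
        congr 1
        · rw [List.map_map]
          refine List.map_congr_left ?_
          rintro ⟨a, b⟩ hkv
          by_cases hkk : a = k
          · have hab : d.get? a = some b := PySem.Dict.get?_of_mem_items d hkv hd
            rw [hkk, hget] at hab
            have hv2 : b = v := (Option.some.inj hab).symm
            simp [pvMergedVal, Function.comp, hkk, PySem.Dict.get?_mk_cons, hknt, hv2, hvw]
          · simp [pvMergedVal, Function.comp, (by simpa using hkk : (a == k) = false),
              PySem.Dict.get?_mk_cons, (by simpa using Ne.symm hkk : (k == a) = false)]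
        · refine List.filter_congr (fun kv hkv => ?_)
          have hne : kv.1 ≠ k := fun h => hk (h ▸ List.mem_map_of_mem hkv)
          rw [PySem.Dict.contains_insert, (by simpa using hne : (kv.1 == k) = false)]
          simp
    | none =>
      have hcont : d.contains k = false := by
        rw [← PySem.Dict.get?_eq_none_iff_contains]; exact hget
      have hkm : k ∉ d.keys := (PySem.Dict.get?_eq_none_iff_not_mem_keys d k).mp hget
      have hkeys : (d.insert k w).keys = d.keys ++ [k] :=
        PySem.Dict.keys_insert_of_not_contains d _ hcont
      have hnd' : (d.insert k w).keys.Nodup := by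
        rw [hkeys]
        refine hd.append (List.nodup_singleton k) ?_
        intro a ha hb
        rw [List.mem_singleton] at hb
        exact hkm (hb ▸ ha)
      rw [ih _ ht hnd', PySem.Dict.items_insert_of_not_contains d _ hcont]
      rw [List.map_append]
      have hhead : [(k, w)].map (pvMergedVal t) = [(k, w)] := by
        simp [pvMergedVal, hknt]
      rw [hhead]
      have hfilt : t.filter (fun kv => !((d.insert k w).contains kv.1)) =
          t.filter (fun kv => !(d.contains kv.1)) := by
        refine List.filter_congr (fun kv hkv => ?_)
        have hne : kv.1 ≠ k := fun h => hk (h ▸ List.mem_map_of_mem hkv)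
        rw [PySem.Dict.contains_insert, (by simpa using hne : (kv.1 == k) = false)]
        simp
      rw [hfilt]
      have hmap : d.items.map (pvMergedVal t) = d.items.map (pvMergedVal ((k, w) :: t)) := by
        refine List.map_congr_left (fun kv hkv => ?_)
        have hne : kv.1 ≠ k := fun h => hkm (h ▸ (by exact List.mem_map_of_mem hkv))
        simp [pvMergedVal, PySem.Dict.get?_mk_cons, (by simpa using Ne.symm hne : (k == kv.1) = false)]
      rw [hmap]
      simp [hcont, List.append_assoc]

-- on a list with distinct keys, filtering the entries at key k and projecting the values
-- yields exactly the dict lookup (as a zero/one element list)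
lemma pv_filter_map_snd (l : List (String × String)) (k : String) (hl : (l.map Prod.fst).Nodup) :
    (l.filter (fun p => p.1 == k)).map (fun p => p.2) = ((PySem.Dict.mk l).get? k).toList := by
  induction l with
  | nil => simp [PySem.Dict.get?]
  | cons p t ih =>
    obtain ⟨a, b⟩ := p
    simp only [List.map_cons, List.nodup_cons] at hl
    obtain ⟨ha, ht⟩ := hl
    rw [PySem.Dict.get?_mk_cons]
    by_cases hak : a = k
    · have htnil : t.filter (fun p => p.1 == k) = [] := by
        refine List.filter_eq_nil_iff.mpr (fun q hq => ?_)
        have : q.1 ≠ a := fun h => ha (h ▸ List.mem_map_of_mem hq)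
        simp [hak ▸ this]
      simp [hak, htnil]
    · simp only [(by simpa using hak : (a == k) = false)]
      simpa [hak] using ih ht

lemma merge_equal (s1 s2 : List (String × String)) :
    merge_role_signatures_constraint_aware_py s1 s2
      = merge_role_signatures_constraint_aware_py_alt s1 s2 := by
  unfold merge_role_signatures_constraint_aware_py merge_role_signatures_constraint_aware_py_alt
  set d1 := PySem.Dict.ofList s1 with hd1def
  set d2 := PySem.Dict.ofList s2 with hd2def
  have hd1 : d1.keys.Nodup := PySem.Dict.nodup_keys_ofList s1
  have hd2 : d2.keys.Nodup := PySem.Dict.nodup_keys_ofList s2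
  -- ===== B side =====
  set L := d1.items ++ d2.items with hLdef
  set groups := L.foldl (fun g p => g.modify p.1 [] (fun vs => vs ++ [p.2]))
      (PySem.Dict.empty : PySem.Dict String (List String)) with hGdef
  have hLkeys : L.map Prod.fst = d1.keys ++ d2.keys := by
    simp only [hLdef, List.map_append]; rfl
  have hgkeys : groups.keys = PySem.Set.ofList (d1.keys ++ d2.keys) := by
    rw [hGdef, PySem.Dict.keys_foldl_modify_key L Prod.fst [] (fun _ p => (· ++ [p.2])) PySem.Dict.empty]
    rw [hLkeys]
    simp [PySem.Set.update_nil_left]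
  have hgnd : groups.keys.Nodup := by rw [hgkeys]; exact PySem.Set.nodup_ofList _
  have hgetD : ∀ k, groups.getD k [] = (L.filter (fun p => p.1 == k)).map (fun p => p.2) := by
    intro k
    rw [hGdef, PySem.Dict.getD_foldl_modify_append]
    simp
  -- second stage inserts fresh distinct keys into an empty dict: a map over the groups
  have hmerged : (groups.items.foldl (fun m p => m.insert p.1 (pvReduce p.2))
      (PySem.Dict.empty : PySem.Dict String String)).items
      = groups.items.map (fun p => (p.1, pvReduce p.2)) := by
    have := PySem.Dict.items_foldl_insert_fresh groups.items Prod.fst (fun p => pvReduce p.2)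
      (PySem.Dict.empty : PySem.Dict String String)
      (fun a _ => PySem.Dict.contains_empty _) hgnd
    simpa using this
  rw [hmerged, PySem.Dict.items_eq_map_keys groups hgnd [], List.map_map, hgkeys]
  -- split the union-of-keys list: keys of d1, then the fresh keys of d2
  rw [PySem.Set.ofList_append, PySem.Set.ofList_eq_self_of_nodup _ hd1,
      PySem.Set.update_eq_append_filter, PySem.Set.ofList_eq_self_of_nodup _ hd2,
      List.map_append]
  -- ===== A side =====
  rw [pv_fold_items d2.items d1 hd2 hd1]
  congr 1
  · -- the keys of signature1, in order
    rw [PySem.Dict.items_eq_map_keys d1 hd1 "", List.map_map]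
    refine List.map_congr_left (fun k hkm => ?_)
    have hv1 : d1.get? k = some (d1.getD k "") := by
      cases h : d1.get? k with
      | none => exact absurd ((PySem.Dict.get?_eq_none_iff_not_mem_keys d1 k).mp h) (by simp [hkm])
      | some v => rw [PySem.Dict.getD_of_get?_eq_some d1 "" h]
    have hfilt : (L.filter (fun p => p.1 == k)).map (fun p => p.2)
        = (d1.get? k).toList ++ (d2.get? k).toList := by
      rw [hLdef, List.filter_append, List.map_append,
          pv_filter_map_snd d1.items k hd1, pv_filter_map_snd d2.items k hd2]
    simp only [Function.comp, hgetD, hfilt, hv1]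
    cases h2 : d2.get? k with
    | some w =>
      by_cases hvw : d1.getD k "" = w
      · simp [pvMergedVal, pvReduce, h2, hvw]
      · simp [pvMergedVal, pvReduce, h2, hvw]
    | none =>
      simp [pvMergedVal, pvReduce, h2]
  · -- the fresh keys of signature2, in order
    rw [PySem.Dict.items_eq_map_keys d2 hd2 "", List.filter_map]
    have hpred : ∀ k, (!(d1.contains ((fun k => (k, d2.getD k "")) k).1))
        = (!(PySem.Set.contains d1.keys k)) := by
      intro k
      simp [PySem.Dict.contains_eq_decide_mem_keys, PySem.Set.contains]
    have hfc : List.filter ((fun kv => !d1.contains kv.1) ∘ fun k => (k, d2.getD k "")) d2.keys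
        = List.filter (fun y => !PySem.Set.contains d1.keys y) d2.keys :=
      List.filter_congr (fun k _ => hpred k)
    rw [hfc]
    refine List.map_congr_left (fun k hkm => ?_)
    have hc : PySem.Set.contains d1.keys k = false := by
      have := List.of_mem_filter hkm
      simpa using this
    have h1 : d1.get? k = none := by
      rw [PySem.Dict.get?_eq_none_iff_not_mem_keys]
      intro hmem
      rw [(PySem.Set.contains_iff d1.keys k).mpr hmem] at hc
      exact Bool.true_eq_false.mp hc
    have hk2 : k ∈ d2.keys := by
      have := List.mem_of_mem_filter hkm; simpa using this
    have hv2 : d2.get? k = some (d2.getD k "") := by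
      cases h : d2.get? k with
      | none => exact absurd ((PySem.Dict.get?_eq_none_iff_not_mem_keys d2 k).mp h) (by simp [hk2])
      | some v => rw [PySem.Dict.getD_of_get?_eq_some d2 "" h]
    have hfilt : (L.filter (fun p => p.1 == k)).map (fun p => p.2)
        = (d1.get? k).toList ++ (d2.get? k).toList := by
      rw [hLdef, List.filter_append, List.map_append,
          pv_filter_map_snd d1.items k hd1, pv_filter_map_snd d2.items k hd2]
    simp [hgetD, hfilt, h1, hv2, pvReduce]

-- ===== VERDICT (by name: the statement is the Claim_ definition above) =====
theorem merge_role_signatures_constraint_aware_py_spec : Claim_equal_merge_role_signatures_constraint_aware_py := by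
  intro s1 s2 _
  unfold Spec_merge_role_signatures_constraint_aware_py
  exact merge_equal s1 s2
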